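-- pv_equiv track=rewrite | github.com/Nakifaru/cs5 | hw8pr2.py | sum67
-- ===== SOURCE A (Python) =====
-- def sum67(nums):
--   ignore = False
--   total = 0
--   for x in nums:
--     if x == 6:
--       ignore = True
--     if ignore == False:
--       total += x
--     if x == 7:
--       ignore = False
--   return total
-- ===== SOURCE B (Python) =====
-- def sum67(nums):
--   nums = list(nums)
--   n = len(nums)
--   total = 0
--   i = 0
--   while i < n:
--     if nums[i] == 6:
--       i += 1
--       while i < n and nums[i] != 7:
--         i += 1
--       i += 1  # skip the terminating 7 (or move past end)
--     else:
--       total += nums[i]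
--       i += 1
--   return total
-- ===== Notes on version B (the rewrite author's own statement) =====
-- stated objective: alternative
-- what changed: Replaces A's boolean ignore-flag scan with an index-driven skip-forward loop: on a 6 an inner loop advances past the matching 7, otherwise the element is added; no flag state is kept.
import Mathlib
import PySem

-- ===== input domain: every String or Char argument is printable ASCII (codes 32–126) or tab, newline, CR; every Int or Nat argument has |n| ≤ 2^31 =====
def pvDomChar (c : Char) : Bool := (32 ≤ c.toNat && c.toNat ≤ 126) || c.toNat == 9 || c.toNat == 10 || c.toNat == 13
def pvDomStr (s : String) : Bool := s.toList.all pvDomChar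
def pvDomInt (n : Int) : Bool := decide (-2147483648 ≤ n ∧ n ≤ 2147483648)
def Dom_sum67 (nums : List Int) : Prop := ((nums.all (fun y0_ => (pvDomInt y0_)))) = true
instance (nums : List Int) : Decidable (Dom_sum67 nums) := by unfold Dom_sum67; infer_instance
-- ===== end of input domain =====

-- B replaces A's boolean ignore-flag scan with an index-driven skip-forward loop (same O(n) cost, no flag state); return values proved equal.

-- ===== PORT A =====
-- A's single for-loop carrying (ignore, total), branches in source order.
def sum67Step (s : Bool × Int) (x : Int) : Bool × Int :=
  let ignore := if x == 6 then true else s.1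
  let total := if ignore == false then s.2 + x else s.2
  let ignore := if x == 7 then false else ignore
  (ignore, total)

def sum67 (nums : List Int) : Int :=
  (nums.foldl sum67Step (false, 0)).2

-- ===== PORT B =====
-- B's inner while loop: advance past elements until (and including) the first 7.
def sum67Skip7 : List Int → List Int
  | [] => []
  | x :: xs => if x == 7 then xs else sum67Skip7 xs

theorem sum67Skip7_length_le (xs : List Int) : (sum67Skip7 xs).length ≤ xs.length := by
  induction xs with
  | nil => simp [sum67Skip7]
  | cons x xs ih =>
    simp only [sum67Skip7]
    split
    · simp
    · exact Nat.le_succ_of_le ih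

-- B's outer loop: on a 6, continue after the skip; otherwise add the element.
def sum67_alt : List Int → Int
  | [] => 0
  | x :: xs =>
    if x == 6 then sum67_alt (sum67Skip7 xs)
    else x + sum67_alt xs
termination_by xs => xs.length
decreasing_by
· exact Nat.lt_succ_of_le (sum67Skip7_length_le xs)
· exact Nat.lt_succ_of_le (Nat.le_refl _)

-- ===== PRECONDITION & SPEC =====
def Spec_sum67 (nums : List Int) (out : Int) : Prop := out = sum67_alt nums
instance (nums : List Int) (out : Int) : Decidable (Spec_sum67 nums out) := by unfold Spec_sum67; infer_instance

-- ===== CLAIM (what is proved, stated in full; the proofs are below) =====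
def Claim_equal_sum67 : Prop := ∀ (nums : List Int), Dom_sum67 nums → Spec_sum67 nums (sum67 nums)

-- ===== LEMMAS AND PROOFS =====

-- While ignoring, A adds nothing and resumes (flag cleared) right after the first 7.
theorem sum67_foldl_true (xs : List Int) (t : Int) :
    (List.foldl sum67Step (true, t) xs).2 = (List.foldl sum67Step (false, t) (sum67Skip7 xs)).2 := by
  induction xs generalizing t with
  | nil => simp [sum67Skip7]
  | cons x xs ih =>
    by_cases h7 : x = 7
    · subst h7
      have : sum67Step (true, t) 7 = (false, t) := rfl
      simp [this, sum67Skip7]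
    · have hs : sum67Step (true, t) x = (true, t) := by
        simp [sum67Step, h7]
      simp only [List.foldl_cons, hs, sum67Skip7]
      rw [if_neg (by simpa using h7)]
      exact ih t

theorem sum67_foldl_false (n : Nat) :
    ∀ (xs : List Int), xs.length ≤ n → ∀ (t : Int),
      (List.foldl sum67Step (false, t) xs).2 = t + sum67_alt xs := by
  induction n with
  | zero =>
    intro xs h t
    have : xs = [] := List.eq_nil_of_length_eq_zero (Nat.le_zero.mp h)
    subst this; simp [sum67_alt]
  | succ n ih =>
    intro xs h t
    cases xs with
    | nil => simp [sum67_alt]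
    | cons x xs =>
      simp only [List.length_cons, Nat.succ_le_succ_iff] at h
      by_cases h6 : x = 6
      · subst h6
        have hstep : sum67Step (false, t) 6 = (true, t) := rfl
        simp only [List.foldl_cons, hstep]
        rw [sum67_foldl_true]
        rw [ih (sum67Skip7 xs) (le_trans (sum67Skip7_length_le xs) h) t]
        simp [sum67_alt]
      · have hstep : sum67Step (false, t) x = (false, t + x) := by
          simp [sum67Step, h6]
        simp only [List.foldl_cons, hstep]
        rw [ih xs h (t + x)]
        simp only [sum67_alt]
        rw [if_neg (by simpa using h6)]
        ring

-- ===== VERDICT (by name: the statement is the Claim_ definition above) =====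
theorem sum67_spec : Claim_equal_sum67 := by
  intro nums _
  unfold Spec_sum67 sum67
  rw [sum67_foldl_false nums.length nums le_rfl 0]
  ring
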